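-- pv_equiv track=rewrite | github.com/MrBrantCode/unitest_baseline | mut_generate/mist_train_cf/cf_100345/solution.py | get_max_strings_with_digits_and_special_chars
-- ===== SOURCE A (Python) =====
-- def get_max_strings_with_digits_and_special_chars(str_list):
--     max_str_1 = ""
--     max_str_2 = ""
--     max_len_1 = 0
--     max_len_2 = 0
--     for s in str_list:
--         # check if string contains at least one digit and one special character
--         if any(c.isdigit() for c in s) and any(c in "@!#$%^&*()" for c in s):
--             s_len = len(s)
--             # if length of current string is greater than max_str_1, update max_str_1 and max_len_1
--             if s_len > max_len_1:
--                 max_str_2 = max_str_1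
--                 max_len_2 = max_len_1
--                 max_str_1 = s
--                 max_len_1 = s_len
--             # if length of current string is greater than max_str_2 but less than max_str_1, update max_str_2 and max_len_2
--             elif s_len > max_len_2 and s_len <= max_len_1:
--                 max_str_2 = s
--                 max_len_2 = s_len
--     return [max_str_1, max_str_2]
-- ===== SOURCE B (Python) =====
-- def get_max_strings_with_digits_and_special_chars(str_list):
--     candidates = [s for s in str_list
--                   if any(c.isdigit() for c in s) and any(c in "@!#$%^&*()" for c in s)]
--     top = sorted(candidates, key=len, reverse=True)
--     return (top + ["", ""])[:2]
-- ===== Notes on version B (the rewrite author's own statement) =====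
-- stated objective: simpler
-- what changed: Replaces A's hand-rolled one-pass top-two tracker (four state variables with explicit shift/insert branching) by filter + stable descending sort on length + take-two padded with "".
import Mathlib
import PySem

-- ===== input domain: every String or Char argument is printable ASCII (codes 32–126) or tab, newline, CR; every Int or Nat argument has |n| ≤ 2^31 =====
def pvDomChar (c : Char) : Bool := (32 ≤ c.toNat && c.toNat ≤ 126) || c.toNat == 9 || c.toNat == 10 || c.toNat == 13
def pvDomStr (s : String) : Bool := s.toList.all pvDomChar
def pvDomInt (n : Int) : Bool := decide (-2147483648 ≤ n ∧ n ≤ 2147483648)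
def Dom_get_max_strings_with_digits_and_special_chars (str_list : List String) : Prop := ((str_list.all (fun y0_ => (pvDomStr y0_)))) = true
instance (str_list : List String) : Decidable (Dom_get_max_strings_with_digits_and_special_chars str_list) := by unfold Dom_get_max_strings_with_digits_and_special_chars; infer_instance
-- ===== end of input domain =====

-- B replaces A's hand-rolled one-pass top-two tracker by filter + stable descending sort by length + take-two-with-padding (objective: simpler).

-- shared candidate predicate: "contains at least one digit and one special character" (identical in both Pythons)
def pvIsCand (s : String) : Bool :=
  s.toList.any (fun c => c.isDigit) && s.toList.any (fun c => "@!#$%^&*()".toList.contains c)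

-- ===== PORT A =====
-- literal transliteration of A's loop: state (max_str_1, max_str_2, max_len_1, max_len_2)
def get_max_strings_with_digits_and_special_chars (str_list : List String) : List String :=
  let st := str_list.foldl
    (fun (st : String × String × Int × Int) s =>
      if pvIsCand s then
        if PySem.Str.len s > st.2.2.1 then (s, st.1, PySem.Str.len s, st.2.2.1)
        else if PySem.Str.len s > st.2.2.2 ∧ PySem.Str.len s ≤ st.2.2.1 then (st.1, s, st.2.2.1, PySem.Str.len s)
        else st
      else st)
    ("", "", 0, 0)
  [st.1, st.2.1]

-- ===== PORT B =====
def get_max_strings_with_digits_and_special_chars_alt (str_list : List String) : List String :=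
  let candidates := str_list.filter pvIsCand
  let top := PySem.List.sorted candidates (fun s => PySem.Str.len s) true
  (top ++ ["", ""]).take 2

-- ===== PRECONDITION & SPEC =====
def Spec_get_max_strings_with_digits_and_special_chars (str_list : List String) (out : List String) : Prop := out = get_max_strings_with_digits_and_special_chars_alt str_list
instance (str_list : List String) (out : List String) : Decidable (Spec_get_max_strings_with_digits_and_special_chars str_list out) := by unfold Spec_get_max_strings_with_digits_and_special_chars; infer_instance

-- ===== CLAIM (what is proved, stated in full; the proofs are below) =====
def Claim_equal_get_max_strings_with_digits_and_special_chars : Prop := ∀ (str_list : List String), Dom_get_max_strings_with_digits_and_special_chars str_list → Spec_get_max_strings_with_digits_and_special_chars str_list (get_max_strings_with_digits_and_special_chars str_list)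

-- ===== LEMMAS AND PROOFS =====

-- top-two abstraction of a (descending-sorted) list: its first two elements, padded with ""
def pvTop2 (l : List String) : String × String := (l.getD 0 "", l.getD 1 "")

-- the pure top-two update step, shared shape of both sides after abstraction
def pvStep (p : String × String) (s : String) : String × String :=
  if PySem.Str.len s > PySem.Str.len p.1 then (s, p.1)
  else if PySem.Str.len s > PySem.Str.len p.2 then (p.1, s)
  else p

lemma pvLen_empty : PySem.Str.len "" = 0 := by decide

lemma pvCand_len (s : String) (h : pvIsCand s = true) : 1 ≤ PySem.Str.len s := by
  have hne : s.toList ≠ [] := by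
    intro hnil
    simp [pvIsCand, hnil] at h
  have hpos : 0 < s.toList.length := List.length_pos_iff.mpr hne
  rw [String.length_toList] at hpos
  rw [PySem.Str.len_eq]
  exact_mod_cast hpos

-- one insertBy step changes the padded top-two exactly as pvStep does (for a string of length ≥ 1)
lemma pvTop2_insertBy (x : String) (acc : List String) (hx : 1 ≤ PySem.Str.len x) :
    pvTop2 (PySem.List.insertBy
      (fun a b => decide (PySem.Str.len b < PySem.Str.len a)) x acc)
    = pvStep (pvTop2 acc) x := by
  have hx' : 1 ≤ x.length := by rw [PySem.Str.len_eq] at hx; exact_mod_cast hx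
  match acc with
  | [] =>
    simp only [PySem.List.insertBy, pvTop2, pvStep]
    split_ifs <;> simp_all [PySem.Str.len_eq]
  | [a] =>
    simp only [PySem.List.insertBy, pvTop2, pvStep]
    simp [PySem.Str.len_eq]
    split_ifs with h1 h2 <;> simp_all
  | a :: b :: t =>
    simp only [PySem.List.insertBy, pvTop2, pvStep]
    simp [PySem.Str.len_eq]
    split_ifs with h1 h2 <;> simp_all

lemma pvTop2_foldl (l : List String) (acc : List String)
    (hl : ∀ s ∈ l, 1 ≤ PySem.Str.len s) :
    pvTop2 (l.foldl (fun acc x => PySem.List.insertBy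
        (fun a b => decide (PySem.Str.len b < PySem.Str.len a)) x acc) acc)
    = l.foldl pvStep (pvTop2 acc) := by
  induction l generalizing acc with
  | nil => rfl
  | cons x t ih =>
    simp only [List.foldl_cons]
    rw [ih _ (fun s hs => hl s (List.mem_cons_of_mem _ hs)),
        pvTop2_insertBy x acc (hl x (List.mem_cons_self))]

-- the padded take-two of B, expressed through pvTop2
lemma pvTake2_pad (xs : List String) :
    (xs ++ ["", ""]).take 2 = [(pvTop2 xs).1, (pvTop2 xs).2] := by
  match xs with
  | [] => rfl
  | [a] => rfl
  | a :: b :: t => rfl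

-- A's guarded fold over the whole list, rewritten as the pure step over the filtered list
lemma pvStep_eq (m1 m2 s : String) :
    pvStep (m1, m2) s =
      if PySem.Str.len s > PySem.Str.len m1 then (s, m1)
      else if PySem.Str.len s > PySem.Str.len m2 then (m1, s)
      else (m1, m2) := rfl

lemma pvA_fold (l : List String) (m1 m2 : String) :
    l.foldl
      (fun (st : String × String × Int × Int) s =>
        if pvIsCand s then
          if PySem.Str.len s > st.2.2.1 then (s, st.1, PySem.Str.len s, st.2.2.1)
          else if PySem.Str.len s > st.2.2.2 ∧ PySem.Str.len s ≤ st.2.2.1 then (st.1, s, st.2.2.1, PySem.Str.len s)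
          else st
        else st)
      (m1, m2, PySem.Str.len m1, PySem.Str.len m2)
    = (let r := (l.filter pvIsCand).foldl pvStep (m1, m2)
       (r.1, r.2, PySem.Str.len r.1, PySem.Str.len r.2)) := by
  induction l generalizing m1 m2 with
  | nil => rfl
  | cons x t ih =>
    simp only [List.foldl_cons, List.filter_cons]
    by_cases hc : pvIsCand x
    · rw [if_pos hc, if_pos hc]
      by_cases h1 : PySem.Str.len x > PySem.Str.len m1
      · rw [if_pos h1, ih, List.foldl_cons, pvStep_eq, if_pos h1]
      · rw [if_neg h1]
        by_cases h2 : PySem.Str.len x > PySem.Str.len m2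
        · have hcond : PySem.Str.len x > PySem.Str.len m2 ∧ PySem.Str.len x ≤ PySem.Str.len m1 :=
            ⟨h2, by omega⟩
          rw [if_pos hcond, ih, List.foldl_cons, pvStep_eq, if_neg h1, if_pos h2]
        · have hno : ¬ (PySem.Str.len x > PySem.Str.len m2 ∧ PySem.Str.len x ≤ PySem.Str.len m1) := by
            intro hh; exact h2 hh.1
          rw [if_neg hno, ih, List.foldl_cons, pvStep_eq, if_neg h1, if_neg h2]
    · rw [if_neg hc, if_neg hc]
      exact ih m1 m2

-- ===== VERDICT (by name: the statement is the Claim_ definition above) =====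
theorem get_max_strings_with_digits_and_special_chars_spec : Claim_equal_get_max_strings_with_digits_and_special_chars := by
  intro str_list _
  unfold Spec_get_max_strings_with_digits_and_special_chars
  unfold get_max_strings_with_digits_and_special_chars get_max_strings_with_digits_and_special_chars_alt
  simp only []
  rw [pvTake2_pad, PySem.List.sorted_rev_eq_foldl_insertBy]
  rw [pvTop2_foldl _ [] (fun s hs => pvCand_len s (List.of_mem_filter hs))]
  have h0 : pvTop2 ([] : List String) = ("", "") := rfl
  rw [h0]
  have hA := pvA_fold str_list "" ""
  simp only [pvLen_empty] at hA
  rw [hA]
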